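-- pv_equiv track=rewrite | github.com/oloszne/python-algorithms | week10-e/solve.py | build_pascal_table_k
-- ===== SOURCE A (Python) =====
-- from typing import List, Tuple
--
-- def build_pascal_table_k(n: int, k: int) -> List[List[int]]:
--     """
--     Construye tabla de Pascal hasta fila n limitada a columnas 0..min(i,k)
--     tal que table[i][j] = C(i,j) para 0 <= i <= n y 0 <= j <= min(i,k).
--     """
--
--     # Inicializa estructura de tabla vacía
--     table: List[List[int]] = []
--
--     # Calculate each row and add it to the table
--     for i in range(n):
--         row = []
--         for j in range(min(i, k) + 1):
--             if j == 0 or j == i: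
--                 row.append(1)
--                 continue
--             if j > i:
--                 continue
--             row.append(table[i-1][j-1] + table[i-1][j])
--         table.append(row)
--
--
--
--     # Devuelve tabla completa
--     return table
-- ===== SOURCE B (Python) =====
-- from typing import List
--
-- def build_pascal_table_k(n: int, k: int) -> List[List[int]]:
--     # Row-local multiplicative closed form: entry j of row i is C(i, j),
--     # maintained as a running product c -> c*(i-j)//(j+1); never reads previous rows.
--     table: List[List[int]] = []
--     for i in range(n):
--         row = []
--         c = 1
--         for j in range(min(i, k) + 1):
--             row.append(c)
--             c = c * (i - j) // (j + 1)
--         table.append(row)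
--     return table
-- ===== Notes on version B (the rewrite author's own statement) =====
-- stated objective: alternative
-- what changed: Replaces the dynamic-programming recurrence reading table[i-1] with a row-local multiplicative closed form C(i,j+1)=C(i,j)*(i-j)//(j+1), so B never references previously built rows.
import Mathlib
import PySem

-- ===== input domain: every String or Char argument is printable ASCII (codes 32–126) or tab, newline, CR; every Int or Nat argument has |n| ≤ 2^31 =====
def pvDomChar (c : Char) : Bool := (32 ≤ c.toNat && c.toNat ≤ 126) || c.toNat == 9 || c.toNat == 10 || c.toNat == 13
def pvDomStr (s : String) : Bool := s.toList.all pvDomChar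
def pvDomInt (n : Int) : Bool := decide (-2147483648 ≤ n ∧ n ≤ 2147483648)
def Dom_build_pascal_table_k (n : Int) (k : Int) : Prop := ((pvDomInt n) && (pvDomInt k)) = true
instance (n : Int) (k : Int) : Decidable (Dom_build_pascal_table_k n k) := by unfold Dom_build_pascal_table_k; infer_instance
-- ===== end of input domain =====

-- B replaces A's DP recurrence reading table[i-1] by a row-local running product
-- C(i,j+1) = C(i,j)*(i-j)//(j+1); same cost, no reference to earlier rows (objective: alternative).

-- ===== PORT A =====
-- table[i-1][j-1] and table[i-1][j]: the indices are always in range in A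
-- (j ≥ 1 and j ≤ min(i,k) < length bounds hold on every reached branch), so
-- pyGetD with a default transcribes the subscript exactly.
def build_pascal_table_k (n : Int) (k : Int) : List (List Int) :=
  (PySem.List.pyRange 0 n 1).foldl (fun table i =>
    let row := (PySem.List.pyRange 0 (min i k + 1) 1).foldl (fun row j =>
      if j == 0 || j == i then row ++ [1]
      else if j > i then row
      else row ++ [PySem.List.pyGetD (PySem.List.pyGetD table (i-1) []) (j-1) 0
                 + PySem.List.pyGetD (PySem.List.pyGetD table (i-1) []) j 0]) []
    table ++ [row]) []

-- ===== PORT B =====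
def build_pascal_table_k_alt (n : Int) (k : Int) : List (List Int) :=
  (PySem.List.pyRange 0 n 1).foldl (fun table i =>
    let p := (PySem.List.pyRange 0 (min i k + 1) 1).foldl (fun (p : List Int × Int) j =>
      (p.1 ++ [p.2], PySem.Int.floordiv (p.2 * (i - j)) (j + 1))) ([], 1)
    table ++ [p.1]) []

-- ===== PRECONDITION & SPEC =====
def Spec_build_pascal_table_k (n : Int) (k : Int) (out : List (List Int)) : Prop := out = build_pascal_table_k_alt n k
instance (n : Int) (k : Int) (out : List (List Int)) : Decidable (Spec_build_pascal_table_k n k out) := by unfold Spec_build_pascal_table_k; infer_instance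

-- ===== CLAIM (what is proved, stated in full; the proofs are below) =====
def Claim_equal_build_pascal_table_k : Prop := ∀ (n : Int) (k : Int), Dom_build_pascal_table_k n k → Spec_build_pascal_table_k n k (build_pascal_table_k n k)

-- ===== LEMMAS AND PROOFS =====

/-- `C(i,j)` on integers, via `Nat.choose` on the truncations. -/
def chooseZ (i j : Int) : Int := (Nat.choose i.toNat j.toNat : Int)

/-- The intended row `i` of the table: `[C(i,0), …, C(i, min i k)]`. -/
def rowSpec (k i : Int) : List Int :=
  (PySem.List.pyRange 0 (min i k + 1) 1).map (chooseZ i)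

lemma chooseZ_zero (i : Int) : chooseZ i 0 = 1 := by simp [chooseZ]

lemma chooseZ_self (i : Int) : chooseZ i i = 1 := by simp [chooseZ]

/-- Pascal's rule on `chooseZ`, for `1 ≤ j < i`. -/
lemma chooseZ_pascal (i j : Int) (h1 : 1 ≤ j) (h2 : j < i) :
    chooseZ (i-1) (j-1) + chooseZ (i-1) j = chooseZ i j := by
  have hi : i.toNat = (i-1).toNat + 1 := by omega
  have hj : j.toNat = (j-1).toNat + 1 := by omega
  have hj' : (i-1).toNat.choose ((j-1).toNat) + (i-1).toNat.choose ((j-1).toNat + 1)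
      = ((i-1).toNat + 1).choose ((j-1).toNat + 1) := (Nat.choose_succ_succ' _ _).symm
  simp only [chooseZ, hi, hj]
  exact_mod_cast hj'

/-- The multiplicative step of B computes the next binomial coefficient. -/
lemma chooseZ_step (i : Int) (t : Nat) (hi : (t : Int) ≤ i) :
    PySem.Int.floordiv (chooseZ i t * (i - t)) ((t : Int) + 1) = chooseZ i (t + 1) := by
  have hN : 0 ≤ i := le_trans (by positivity) hi
  set N := i.toNat with hNdef
  have hiN : i = (N : Int) := by omega
  have htN : t ≤ N := by omega
  have hmul : N.choose (t+1) * (t+1) = N.choose t * (N - t) := Nat.choose_succ_right_eq N t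
  have hsub : i - (t : Int) = ((N - t : Nat) : Int) := by omega
  have hch : chooseZ i t = (N.choose t : Int) := by simp [chooseZ, hNdef]
  have hcast : chooseZ i t * (i - (t : Int)) = ((N.choose (t+1) * (t+1) : Nat) : Int) := by
    rw [hch, hsub, hmul]
    push_cast
    ring
  have htoNat : ((t : Int) + 1).toNat = t + 1 := by omega
  rw [hcast, PySem.Int.floordiv_eq_ediv_of_pos (by positivity)]
  have : ((N.choose (t+1) * (t+1) : Nat) : Int) = (N.choose (t+1) : Int) * ((t : Int) + 1) := by
    push_cast; ring
  rw [this, Int.mul_ediv_cancel _ (by positivity)]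
  simp [chooseZ, hNdef, htoNat]

/-- Reading entry `j` of the spec row `r` (for `0 ≤ j ≤ min r k`). -/
lemma pyGetD_rowSpec (k r j : Int) (h0 : 0 ≤ j) (h1 : j ≤ min r k) :
    PySem.List.pyGetD (rowSpec k r) j 0 = chooseZ r j := by
  have hj : j = ((j.toNat : Nat) : Int) := by omega
  have hlt : j.toNat < (min r k + 1).toNat := by omega
  have hb : min r k + 1 = (((min r k + 1).toNat : Nat) : Int) := by omega
  rw [rowSpec, hj, hb, PySem.List.pyGetD_map_pyRange _ _ _ _ hlt]

/-- A's inner loop builds the spec row, given that the previous row in `table`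
    (read through `pyGetD`) is the spec row. -/
lemma innerA_eq (k i : Int) (hi : 0 ≤ i) (table : List (List Int))
    (hprev : 1 ≤ i → PySem.List.pyGetD table (i-1) [] = rowSpec k (i-1)) :
    (PySem.List.pyRange 0 (min i k + 1) 1).foldl (fun row j =>
      if j == 0 || j == i then row ++ [1]
      else if j > i then row
      else row ++ [PySem.List.pyGetD (PySem.List.pyGetD table (i-1) []) (j-1) 0
                 + PySem.List.pyGetD (PySem.List.pyGetD table (i-1) []) j 0]) []
      = rowSpec k i := by
  rw [rowSpec]
  rw [PySem.List.foldl_congr_mem (g := fun row j => row ++ [chooseZ i j]) _ _ _ ?_]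
  · exact PySem.List.foldl_append_singleton_eq_map _ _ []
  · intro row j hj
    obtain ⟨hj0, hj1⟩ := PySem.List.mem_pyRange_one.mp hj
    by_cases hz : j = 0
    · simp [hz, chooseZ_zero]
    · by_cases hsi : j = i
      · simp [hsi, chooseZ_self]
      · have hji : j < i := by omega
        have h1j : 1 ≤ j := by omega
        have hng : ¬ (j > i) := by omega
        have hprev' := hprev (by omega)
        rw [if_neg (by simp [hz, hsi]), if_neg (by simpa using hng), hprev',
            pyGetD_rowSpec k (i-1) (j-1) (by omega) (by omega),
            pyGetD_rowSpec k (i-1) j (by omega) (by omega),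
            chooseZ_pascal i j h1j hji]

/-- B's inner loop invariant: after the prefix `range(0, t)` the accumulated row is
    the mapped prefix and the running product is `C(i, t)`. -/
lemma innerB_inv (k i : Int) (_hi : 0 ≤ i) (t : Nat) (ht : (t : Int) ≤ min i k + 1) :
    (PySem.List.pyRange 0 (t : Int) 1).foldl (fun (p : List Int × Int) j =>
      (p.1 ++ [p.2], PySem.Int.floordiv (p.2 * (i - j)) (j + 1))) ([], 1)
      = ((PySem.List.pyRange 0 (t : Int) 1).map (chooseZ i), chooseZ i t) := by
  induction t with
  | zero => simp [PySem.List.pyRange_one_eq_nil, chooseZ_zero]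
  | succ m ih =>
    have hm : (m : Int) ≤ min i k + 1 := by push_cast at ht ⊢; omega
    have hmi : (m : Int) ≤ i := by omega
    have hsp : ((m : Int) + 1) = ((m + 1 : Nat) : Int) := by push_cast; ring
    rw [← hsp, PySem.List.pyRange_one_succ_right (by positivity),
        List.foldl_append, List.map_append, ih hm]
    simp only [List.foldl_cons, List.foldl_nil, List.map_cons, List.map_nil]
    rw [chooseZ_step i m hmi]

/-- B's inner loop builds the spec row. -/
lemma innerB_eq (k i : Int) (hi : 0 ≤ i) :
    ((PySem.List.pyRange 0 (min i k + 1) 1).foldl (fun (p : List Int × Int) j =>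
      (p.1 ++ [p.2], PySem.Int.floordiv (p.2 * (i - j)) (j + 1))) ([], 1)).1
      = rowSpec k i := by
  by_cases hk : min i k + 1 ≤ 0
  · simp [PySem.List.pyRange_one_eq_nil hk, rowSpec]
  · have h0 : 0 ≤ min i k + 1 := by omega
    have hcast : min i k + 1 = (((min i k + 1).toNat : Nat) : Int) := by omega
    rw [rowSpec, hcast, innerB_inv k i hi _ (by omega)]

/-- Reading row `i-1` of the accumulated table of spec rows. -/
lemma pyGetD_table (k i : Int) (h1 : 1 ≤ i) :
    PySem.List.pyGetD ((PySem.List.pyRange 0 i 1).map (rowSpec k)) (i-1) [] = rowSpec k (i-1) := by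
  have hi : i - 1 = (((i-1).toNat : Nat) : Int) := by omega
  have hlt : (i-1).toNat < i.toNat := by omega
  have hr : PySem.List.pyRange 0 i 1 = PySem.List.pyRange 0 ((i.toNat : Nat) : Int) 1 := by
    congr 1; omega
  rw [hi, hr, PySem.List.pyGetD_map_pyRange (rowSpec k) i.toNat (i-1).toNat [] hlt]

/-- Both outer loops over `range(0, t)` build the table of spec rows. -/
lemma outer_eq (k : Int) (t : Nat) :
    ((PySem.List.pyRange 0 (t : Int) 1).foldl (fun table i =>
      let row := (PySem.List.pyRange 0 (min i k + 1) 1).foldl (fun row j =>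
        if j == 0 || j == i then row ++ [1]
        else if j > i then row
        else row ++ [PySem.List.pyGetD (PySem.List.pyGetD table (i-1) []) (j-1) 0
                   + PySem.List.pyGetD (PySem.List.pyGetD table (i-1) []) j 0]) []
      table ++ [row]) []
      = (PySem.List.pyRange 0 (t : Int) 1).map (rowSpec k))
    ∧ ((PySem.List.pyRange 0 (t : Int) 1).foldl (fun table i =>
      let p := (PySem.List.pyRange 0 (min i k + 1) 1).foldl (fun (p : List Int × Int) j =>
        (p.1 ++ [p.2], PySem.Int.floordiv (p.2 * (i - j)) (j + 1))) ([], 1)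
      table ++ [p.1]) []
      = (PySem.List.pyRange 0 (t : Int) 1).map (rowSpec k)) := by
  induction t with
  | zero => simp [PySem.List.pyRange_one_eq_nil]
  | succ m ih =>
    obtain ⟨ihA, ihB⟩ := ih
    have hsp : ((m + 1 : Nat) : Int) = (m : Int) + 1 := by push_cast; ring
    rw [hsp, PySem.List.pyRange_one_succ_right (by positivity)]
    constructor
    · rw [List.foldl_append, List.map_append, ihA]
      simp only [List.foldl_cons, List.foldl_nil, List.map_cons, List.map_nil]
      rw [innerA_eq k m (by positivity) _ (fun h1 => pyGetD_table k m h1)]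
    · rw [List.foldl_append, List.map_append, ihB]
      simp only [List.foldl_cons, List.foldl_nil, List.map_cons, List.map_nil]
      rw [innerB_eq k m (by positivity)]

-- ===== VERDICT (by name: the statement is the Claim_ definition above) =====
theorem build_pascal_table_k_spec : Claim_equal_build_pascal_table_k := by
  intro n k _
  unfold Spec_build_pascal_table_k build_pascal_table_k build_pascal_table_k_alt
  by_cases hn : n ≤ 0
  · simp [PySem.List.pyRange_one_eq_nil hn]
  · have hc : n = ((n.toNat : Nat) : Int) := by omega
    rw [hc, (outer_eq k n.toNat).1, (outer_eq k n.toNat).2]
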